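-- pv_equiv track=rewrite | github.com/patrikkendi/pythonProject | 25.py | expressionMake
-- ===== SOURCE A (Python) =====
-- def expressionMake(v):
--     prime_numbers, even_numbers, odd_numbers = [], [], []
--
--     # megnézzük, mely számok prímek
--     for i in range(len(v)):
--         if v[i] > 1:
--             for j in range(2, v[i]):
--                 if (v[i] % j) == 0:
--                     break
--             else:
--                 prime_numbers.append(v[i])
--     #megnézzük mely számok párosak, páratlanak, prímek és hozzáadjuk a listához
--     for i in range(len(v)):
--         if (v[i] % 2) == 0:
--             even_numbers.append(v[i])
--         else:
--             odd_numbers.append(v[i])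
--
--     if len(prime_numbers) > 1:
--         return 'prime_numbers', prime_numbers
--     elif len(odd_numbers) > 1:
--         return 'odd_numbers', odd_numbers
--     else:
--         return 'even_numbers', even_numbers
-- ===== SOURCE B (Python) =====
-- def _is_prime(x):
--     # x > 1; odd trial division up to the square root
--     if x % 2 == 0:
--         return x == 2
--     d = 3
--     while d * d <= x:
--         if x % d == 0:
--             return False
--         d += 2
--     return True
--
--
-- def expressionMake(v):
--     prime_numbers, even_numbers, odd_numbers = [], [], []
--     for x in v:
--         if x > 1 and _is_prime(x):
--             prime_numbers.append(x)
--         if x % 2 == 0: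
--             even_numbers.append(x)
--         else:
--             odd_numbers.append(x)
--     if len(prime_numbers) > 1:
--         return 'prime_numbers', prime_numbers
--     elif len(odd_numbers) > 1:
--         return 'odd_numbers', odd_numbers
--     else:
--         return 'even_numbers', even_numbers
-- ===== Notes on version B (the rewrite author's own statement) =====
-- stated objective: faster
-- what changed: Single pass over the values (no index loop) with primality decided by odd trial division up to the square root instead of scanning every j in range(2, x).
import Mathlib
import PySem

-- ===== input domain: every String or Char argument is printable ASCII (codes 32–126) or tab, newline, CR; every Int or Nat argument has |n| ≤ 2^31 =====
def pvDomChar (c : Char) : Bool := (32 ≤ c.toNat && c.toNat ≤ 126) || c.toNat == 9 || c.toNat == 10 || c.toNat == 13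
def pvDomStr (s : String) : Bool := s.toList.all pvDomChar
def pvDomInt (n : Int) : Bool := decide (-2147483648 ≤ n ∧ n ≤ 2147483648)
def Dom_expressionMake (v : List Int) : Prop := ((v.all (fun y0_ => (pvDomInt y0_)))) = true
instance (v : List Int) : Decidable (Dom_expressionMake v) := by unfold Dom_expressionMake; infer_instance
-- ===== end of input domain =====

-- B makes one pass over the values (no index loop) and decides primality by odd
-- trial division up to the square root instead of scanning all of range(2, x).


-- ===== PORT A =====
-- A's inner for-else loop: scan range(2, x); break (false) on the first divisor,
-- else (true) when the range is exhausted.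
def aNoDivisor (x : Int) : List Int → Bool
  | [] => true
  | j :: js => if PySem.Int.mod x j == 0 then false else aNoDivisor x js

def expressionMake (v : List Int) : String × List Int :=
  let prime_numbers :=
    (PySem.List.pyRange 0 v.length 1).foldl (fun acc i =>
      let x := PySem.List.pyGetD v i 0
      if 1 < x then
        if aNoDivisor x (PySem.List.pyRange 2 x 1) then acc ++ [x] else acc
      else acc) []
  let eo :=
    (PySem.List.pyRange 0 v.length 1).foldl (fun (p : List Int × List Int) i =>
      let x := PySem.List.pyGetD v i 0
      if PySem.Int.mod x 2 == 0 then (p.1 ++ [x], p.2) else (p.1, p.2 ++ [x])) ([], [])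
  if prime_numbers.length > 1 then ("prime_numbers", prime_numbers)
  else if eo.2.length > 1 then ("odd_numbers", eo.2)
  else ("even_numbers", eo.1)

-- ===== PORT B =====
-- the 'while d * d <= x' loop of _is_prime
def bLoop (x d : Int) : Bool :=
  if h : d * d ≤ x then
    if PySem.Int.mod x d == 0 then false else bLoop x (d + 2)
  else true
termination_by (x + 1 - d).toNat
decreasing_by
  have hdx : d ≤ x := by nlinarith [sq_nonneg d]
  omega

def bIsPrime (x : Int) : Bool :=
  if PySem.Int.mod x 2 == 0 then x == 2 else bLoop x 3

def expressionMake_alt (v : List Int) : String × List Int :=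
  let t :=
    v.foldl (fun (t : List Int × List Int × List Int) x =>
      let p := if 1 < x && bIsPrime x then t.1 ++ [x] else t.1
      if PySem.Int.mod x 2 == 0 then (p, t.2.1 ++ [x], t.2.2)
      else (p, t.2.1, t.2.2 ++ [x])) ([], [], [])
  if t.1.length > 1 then ("prime_numbers", t.1)
  else if t.2.2.length > 1 then ("odd_numbers", t.2.2)
  else ("even_numbers", t.2.1)

-- ===== PRECONDITION & SPEC =====
def Spec_expressionMake (v : List Int) (out : String × List Int) : Prop := out = expressionMake_alt v
instance (v : List Int) (out : String × List Int) : Decidable (Spec_expressionMake v out) := by unfold Spec_expressionMake; infer_instance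

-- ===== CLAIM (what is proved, stated in full; the proofs are below) =====
def Claim_equal_expressionMake : Prop := ∀ (v : List Int), Dom_expressionMake v → Spec_expressionMake v (expressionMake v)

-- ===== LEMMAS AND PROOFS =====

-- A's scan of range(2, x) succeeds iff no j with 2 ≤ j < x divides x
theorem aNoDivisor_iff (x a : Int) :
    aNoDivisor x (PySem.List.pyRange a x 1) = true ↔
      ∀ j : Int, a ≤ j → j < x → ¬ j ∣ x := by
  by_cases h : x ≤ a
  · rw [PySem.List.pyRange_one_eq_nil h]
    simp only [aNoDivisor, true_iff]
    intro j hj hjx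
    omega
  · have h' : a < x := by omega
    rw [PySem.List.pyRange_one_cons h']
    simp only [aNoDivisor]
    by_cases hd : PySem.Int.mod x a = 0
    · have hdvd : a ∣ x := (PySem.Int.mod_eq_zero_iff_dvd x a).1 hd
      simp only [hd, beq_self_eq_true, if_true]
      constructor
      · intro hfalse; exact absurd hfalse (by simp)
      · intro hall; exact absurd hdvd (hall a le_rfl h')
    · rw [show (PySem.Int.mod x a == 0) = false from by
        simp only [beq_eq_false_iff_ne, ne_eq]; exact hd]
      simp only [Bool.false_eq_true, if_false]
      rw [aNoDivisor_iff x (a + 1)]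
      constructor
      · intro hall j hj hjx hdvd
        rcases eq_or_lt_of_le hj with rfl | hlt
        · exact hd ((PySem.Int.mod_eq_zero_iff_dvd x a).2 hdvd)
        · exact hall j (by omega) hjx hdvd
      · intro hall j hj hjx hdvd
        exact hall j (by omega) hjx hdvd
termination_by (x - a).toNat
decreasing_by omega

-- B's while loop succeeds iff no d ≥ d0 of the same parity as d0 with d*d ≤ x divides x
theorem bLoop_iff (x d0 : Int) (h3 : 3 ≤ d0) :
    bLoop x d0 = true ↔
      ∀ d : Int, (∃ k : Nat, d = d0 + 2 * k) → d * d ≤ x → ¬ d ∣ x := by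
  rw [bLoop]
  by_cases hle : d0 * d0 ≤ x
  · simp only [hle, dif_pos]
    by_cases hm : PySem.Int.mod x d0 = 0
    · have hdvd : d0 ∣ x := (PySem.Int.mod_eq_zero_iff_dvd x d0).1 hm
      simp only [hm, beq_self_eq_true, if_true]
      constructor
      · intro hfalse; exact absurd hfalse (by simp)
      · intro hall
        exact absurd hdvd (hall d0 ⟨0, by omega⟩ hle)
    · rw [show (PySem.Int.mod x d0 == 0) = false from by
        simp only [beq_eq_false_iff_ne, ne_eq]; exact hm]
      simp only [Bool.false_eq_true, if_false]
      rw [bLoop_iff x (d0 + 2) (by omega)]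
      constructor
      · intro hall d hk hdd hdvd
        rcases hk with ⟨k, rfl⟩
        cases k with
        | zero =>
          simp only [Nat.cast_zero, mul_zero, add_zero] at hdd hdvd
          exact hm ((PySem.Int.mod_eq_zero_iff_dvd x d0).2 hdvd)
        | succ k' =>
          exact hall (d0 + 2 * (k' + 1 : Nat)) ⟨k', by push_cast; ring⟩ hdd hdvd
      · intro hall d hk hdd hdvd
        rcases hk with ⟨k, rfl⟩
        exact hall (d0 + 2 + 2 * k) ⟨k + 1, by push_cast; ring⟩ (by linarith) hdvd
  · simp only [hle, dif_neg, not_false_eq_true, true_iff]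
    intro d hk hdd hdvd
    rcases hk with ⟨k, hkd⟩
    have hd0 : d0 ≤ d := by omega
    have : d0 * d0 ≤ d * d := by nlinarith
    omega
termination_by (x + 1 - d0).toNat
decreasing_by
  have : d0 ≤ x := by nlinarith
  omega

-- pointwise agreement of the two primality tests
theorem prime_test_eq (x : Int) (hx : 1 < x) :
    aNoDivisor x (PySem.List.pyRange 2 x 1) = bIsPrime x := by
  unfold bIsPrime
  by_cases h2 : PySem.Int.mod x 2 = 0
  · have hdvd : (2 : Int) ∣ x := (PySem.Int.mod_eq_zero_iff_dvd x 2).1 h2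
    simp only [h2, beq_self_eq_true, if_true]
    by_cases hx2 : x = 2
    · subst hx2
      decide
    · have hx4 : 2 < x := by
        rcases hdvd with ⟨c, rfl⟩; omega
      have : aNoDivisor x (PySem.List.pyRange 2 x 1) = false := by
        rw [Bool.eq_false_iff]
        intro htrue
        exact (aNoDivisor_iff x 2).1 htrue 2 le_rfl hx4 hdvd
      simp [this, hx2]
  · have hodd : ¬ (2 : Int) ∣ x := fun hd => h2 ((PySem.Int.mod_eq_zero_iff_dvd x 2).2 hd)
    rw [show (PySem.Int.mod x 2 == 0) = false from by
      simp only [beq_eq_false_iff_ne, ne_eq]; exact h2]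
    simp only [Bool.false_eq_true, if_false]
    rw [Bool.eq_iff_iff, aNoDivisor_iff, bLoop_iff x 3 le_rfl]
    constructor
    · intro hall d hk hdd hdvd
      have hd3 : 3 ≤ d := by rcases hk with ⟨k, rfl⟩; omega
      have hdx : d < x := by nlinarith
      exact hall d (by omega) hdx hdvd
    · intro hall j hj hjx hdvd
      -- take m = min j (x / j); it divides x, is odd, ≥ 3, and m * m ≤ x
      rcases hdvd with ⟨c, hc⟩
      have hxpos : 0 < x := by omega
      have hjpos : 0 < j := by omega
      have hcpos : 0 < c := by nlinarith
      have hc2 : 2 ≤ c := by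
        by_contra hlt
        have : c = 1 := by omega
        subst this; omega
      set m := min j c with hm
      have hmj : m ≤ j := min_le_left _ _
      have hmc : m ≤ c := min_le_right _ _
      have hm2 : 2 ≤ m := by
        rcases min_cases j c with ⟨he, _⟩ | ⟨he, _⟩ <;> omega
      have hmdvd : m ∣ x := by
        rcases min_cases j c with ⟨he, _⟩ | ⟨he, _⟩
        · rw [hm, he]; exact ⟨c, hc⟩
        · rw [hm, he]; exact ⟨j, by rw [hc]; ring⟩
      have hmm : m * m ≤ x := by nlinarith
      have hmodd : ¬ (2 : Int) ∣ m := fun hd => hodd (hd.trans hmdvd)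
      have hm3 : 3 ≤ m := by omega
      have hk : ∃ k : Nat, m = 3 + 2 * (k : Int) := ⟨((m - 3) / 2).toNat, by omega⟩
      exact hall m hk hmm hmdvd

-- generic loop shapes (stated over abstract tests so the proofs are by plain induction)
theorem foldl_guarded_append (c : Int → Prop) [DecidablePred c] (p : Int → Bool)
    (l : List Int) (acc : List Int) :
    l.foldl (fun acc x =>
        if c x then (if p x then acc ++ [x] else acc) else acc) acc
      = acc ++ l.filter (fun x => decide (c x) && p x) := by
  induction l generalizing acc with
  | nil => simp
  | cons y l ih =>
    simp only [List.foldl_cons, List.filter_cons]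
    by_cases hc : c y
    · by_cases hp : p y = true
      · simp [hc, hp, ih]
      · simp [hc, hp, ih]
    · simp [hc, ih]

theorem foldl_pair_split (q : Int → Bool) (l : List Int) (acc : List Int × List Int) :
    l.foldl (fun (p : List Int × List Int) x =>
        if q x then (p.1 ++ [x], p.2) else (p.1, p.2 ++ [x])) acc
      = (acc.1 ++ l.filter q, acc.2 ++ l.filter (fun x => !q x)) := by
  induction l generalizing acc with
  | nil => simp
  | cons y l ih =>
    simp only [List.foldl_cons, List.filter_cons]
    by_cases hq : q y = true
    · simp [hq, ih]
    · simp [hq, ih]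

theorem foldl_triple_split (pb q : Int → Bool) (l : List Int)
    (acc : List Int × List Int × List Int) :
    l.foldl (fun (t : List Int × List Int × List Int) x =>
        let p := if pb x then t.1 ++ [x] else t.1
        if q x then (p, t.2.1 ++ [x], t.2.2) else (p, t.2.1, t.2.2 ++ [x])) acc
      = (acc.1 ++ l.filter pb, acc.2.1 ++ l.filter q, acc.2.2 ++ l.filter (fun x => !q x)) := by
  induction l generalizing acc with
  | nil => simp
  | cons y l ih =>
    simp only [List.foldl_cons, List.filter_cons]
    by_cases hq : q y = true
    · by_cases hp : pb y = true
      · simp [hq, hp, ih]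
      · simp [hq, hp, ih]
    · by_cases hp : pb y = true
      · simp [hq, hp, ih]
      · simp [hq, hp, ih]

-- the two prime filters coincide
theorem prime_filter_eq (l : List Int) :
    l.filter (fun x => decide (1 < x) && aNoDivisor x (PySem.List.pyRange 2 x 1))
      = l.filter (fun x => decide (1 < x) && bIsPrime x) := by
  apply List.filter_congr
  intro x _
  by_cases hx : 1 < x
  · simp [hx, prime_test_eq x hx]
  · simp [hx]

-- ===== VERDICT (by name: the statement is the Claim_ definition above) =====
theorem expressionMake_spec : Claim_equal_expressionMake := by
  intro v _
  show expressionMake v = expressionMake_alt v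
  unfold expressionMake expressionMake_alt
  rw [PySem.List.foldl_pyRange_zero_pyGetD' v 0
      (fun acc x =>
        if 1 < x then
          if aNoDivisor x (PySem.List.pyRange 2 x 1) then acc ++ [x] else acc
        else acc) [],
      PySem.List.foldl_pyRange_zero_pyGetD' v 0
      (fun (p : List Int × List Int) x =>
        if PySem.Int.mod x 2 == 0 then (p.1 ++ [x], p.2) else (p.1, p.2 ++ [x])) ([], []),
      foldl_guarded_append (fun x => 1 < x) (fun x => aNoDivisor x (PySem.List.pyRange 2 x 1)) v [],
      foldl_pair_split (fun x => PySem.Int.mod x 2 == 0) v ([], []),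
      foldl_triple_split (fun x => decide (1 < x) && bIsPrime x)
        (fun x => PySem.Int.mod x 2 == 0) v ([], [], []),
      prime_filter_eq]
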